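-- pv_equiv track=rewrite | github.com/batman2702/Vanhack-assignment | python-coding.py | dirReduc
-- ===== SOURCE A (Python) =====
-- def dirReduc(plan):
--     opposites = {'NORTH': 'SOUTH', 'SOUTH': 'NORTH', 'EAST': 'WEST', 'WEST': 'EAST'}
--     stack = []
--     for direction in plan:
--         if stack and opposites[direction] == stack[-1]:
--             stack.pop()
--         else:
--             stack.append(direction)
--     return stack
-- ===== SOURCE B (Python) =====
-- def dirReduc(plan):
--     opposites = {'NORTH': 'SOUTH', 'SOUTH': 'NORTH', 'EAST': 'WEST', 'WEST': 'EAST'}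
--     cur = list(plan)
--     while True:
--         for i in range(len(cur) - 1):
--             if opposites[cur[i + 1]] == cur[i]:
--                 del cur[i:i + 2]
--                 break
--         else:
--             return cur
-- ===== Notes on version B (the rewrite author's own statement) =====
-- stated objective: alternative
-- what changed: A does a single left-to-right stack pass (push, pop on opposite top); B instead repeatedly scans the list for the first adjacent opposite pair, deletes it and restarts until a fixpoint, which provably yields the same reduced list.
-- outside the precondition, e.g. on dirReduc(['NORTH', 'SOUTH', 'X']): A returns ['X'], B returns ['X']
import Mathlib
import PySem

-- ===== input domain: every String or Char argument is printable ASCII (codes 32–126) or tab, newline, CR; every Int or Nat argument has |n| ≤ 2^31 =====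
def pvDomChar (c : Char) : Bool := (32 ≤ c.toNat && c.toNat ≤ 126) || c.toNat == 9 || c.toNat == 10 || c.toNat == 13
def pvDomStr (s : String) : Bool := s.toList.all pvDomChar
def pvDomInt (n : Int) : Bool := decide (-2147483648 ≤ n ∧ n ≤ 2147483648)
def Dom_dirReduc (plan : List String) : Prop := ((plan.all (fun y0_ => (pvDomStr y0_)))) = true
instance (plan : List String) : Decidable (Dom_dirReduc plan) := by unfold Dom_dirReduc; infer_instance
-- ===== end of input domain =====

-- B replaces A's single stack pass by a fixpoint loop that repeatedly deletes the first
-- adjacent opposite pair (objective: alternative algorithm, same result on valid plans).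

-- ===== PORT A =====
-- the dict literal both Pythons build
def pvOpposites : PySem.Dict String String :=
  PySem.Dict.ofList [("NORTH", "SOUTH"), ("SOUTH", "NORTH"), ("EAST", "WEST"), ("WEST", "EAST")]

def dirReduc (plan : List String) : List String :=
  plan.foldl
    (fun stack direction =>
      if stack ≠ [] ∧ pvOpposites.get? direction = PySem.List.pyGet? stack (-1)
      then stack.dropLast
      else stack ++ [direction])
    []

-- ===== PORT B =====
-- inner 'for i in range(len(cur)-1)' of Source B: find the first adjacent pair with
-- opposites[cur[i + 1]] == cur[i], return the list with that pair deleted (none = no pair);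
-- the Python lookup raises outside Pre_, where the condition's value is unconstrained, so
-- the total get? is used
def pvScan : List String → Option (List String)
  | a :: b :: t =>
      if pvOpposites.get? b = some a then some t
      else (pvScan (b :: t)).map (a :: ·)
  | _ => none

theorem pvScan_length {l l' : List String} (h : pvScan l = some l') : l'.length < l.length := by
  induction l generalizing l' with
  | nil => simp [pvScan] at h
  | cons a t ih =>
    cases t with
    | nil => simp [pvScan] at h
    | cons b t =>
      rw [pvScan] at h
      split at h
      · cases h; simp
      · cases hm : pvScan (b :: t) with
        | none => rw [hm] at h; simp at h
        | some m =>
          rw [hm] at h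
          cases h
          have := ih hm
          simpa using Nat.succ_lt_succ this

-- the outer 'while True' of Source B: repeat until no pair is found
def dirReduc_alt (plan : List String) : List String :=
  match h : pvScan plan with
  | some l' => dirReduc_alt l'
  | none => plan
termination_by plan.length
decreasing_by exact pvScan_length h

-- ===== PRECONDITION & SPEC =====
-- Pre_ excludes lists with a token outside the four directions anywhere after the first
-- position: on those A raises KeyError whenever such a token is scanned with a non-empty
-- stack, and where A still returns (the bad token only ever meets an empty stack) its
-- survival of the token is an accident of A's traversal that B happens to share anyway.
def Pre_dirReduc (plan : List String) : Prop :=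
  ∀ x ∈ plan.tail, x = "NORTH" ∨ x = "SOUTH" ∨ x = "EAST" ∨ x = "WEST"

instance (plan : List String) : Decidable (Pre_dirReduc plan) := by
  unfold Pre_dirReduc; infer_instance

def pvWitness_dirReduc : List String := ["NORTH", "SOUTH", "EAST"]

def Spec_dirReduc (plan : List String) (out : List String) : Prop := out = dirReduc_alt plan
instance (plan : List String) (out : List String) : Decidable (Spec_dirReduc plan out) := by unfold Spec_dirReduc; infer_instance

-- ===== CLAIM (what is proved, stated in full; the proofs are below) =====
def Claim_equal_dirReduc : Prop := ∀ (plan : List String), Dom_dirReduc plan → Pre_dirReduc plan → Spec_dirReduc plan (dirReduc plan)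

-- ===== LEMMAS AND PROOFS =====

def pvValid (x : String) : Prop := x = "NORTH" ∨ x = "SOUTH" ∨ x = "EAST" ∨ x = "WEST"

-- A's loop body as a named function (definitionally the lambda in dirReduc)
def pvStep (stack : List String) (direction : String) : List String :=
  if stack ≠ [] ∧ pvOpposites.get? direction = PySem.List.pyGet? stack (-1)
  then stack.dropLast
  else stack ++ [direction]

theorem dirReduc_eq_foldl (plan : List String) :
    dirReduc plan = plan.foldl pvStep [] := rfl

-- "the later element does not cancel the earlier" (A's cancel test)
def pvRA (x y : String) : Prop := ¬ (pvOpposites.get? y = some x)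

theorem pvOpp_N : pvOpposites.get? "NORTH" = some "SOUTH" := by decide
theorem pvOpp_S : pvOpposites.get? "SOUTH" = some "NORTH" := by decide
theorem pvOpp_E : pvOpposites.get? "EAST" = some "WEST" := by decide
theorem pvOpp_W : pvOpposites.get? "WEST" = some "EAST" := by decide

theorem pv_opp_valid {a b : String} (ha : pvValid a)
    (h : pvOpposites.get? a = some b) : pvValid b := by
  rcases ha with rfl | rfl | rfl | rfl <;>
    simp only [pvOpp_N, pvOpp_S, pvOpp_E, pvOpp_W, Option.some.injEq] at h <;>
    (subst h; simp [pvValid])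

theorem pv_opp_symm {a b : String} (ha : pvValid a) (hb : pvValid b)
    (h : pvOpposites.get? a = some b) : pvOpposites.get? b = some a := by
  rcases ha with rfl | rfl | rfl | rfl <;> rcases hb with rfl | rfl | rfl | rfl <;>
    revert h <;> decide

theorem pvStep_chain {s : List String} (hs : List.IsChain pvRA s) (d : String) :
    List.IsChain pvRA (pvStep s d) := by
  unfold pvStep
  split
  · exact hs.dropLast
  · rename_i hcond
    refine List.isChain_append.2 ⟨hs, List.isChain_singleton d, ?_⟩
    intro x hx y hy
    simp at hy
    subst hy
    intro hc
    apply hcond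
    refine ⟨?_, ?_⟩
    · intro he; subst he; simp at hx
    · rw [PySem.List.pyGet?_neg_one, hx, hc]

theorem pvFoldl_chain {s : List String} (hs : List.IsChain pvRA s) (l : List String) :
    List.IsChain pvRA (l.foldl pvStep s) := by
  induction l generalizing s with
  | nil => exact hs
  | cons d t ih => exact ih (pvStep_chain hs d)

-- an irreducible suffix passes through A's stack untouched
theorem pvFoldl_irr : ∀ (l s : List String), List.IsChain pvRA (s ++ l) →
    l.foldl pvStep s = s ++ l := by
  intro l
  induction l with
  | nil => intro s _; simp
  | cons d t ih =>
    intro s hc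
    have hstep : pvStep s d = s ++ [d] := by
      unfold pvStep
      rw [if_neg]
      rintro ⟨hne, hget⟩
      rcases List.exists_cons_of_ne_nil hne with ⟨y, u, rfl⟩
      rcases (List.isChain_append (l₁ := y :: u) (l₂ := d :: t)).1 hc with ⟨_, _, hjx⟩
      have hlast : ((y :: u).getLast?).isSome := by
        simp [List.getLast?_isSome]
      rcases Option.isSome_iff_exists.1 hlast with ⟨z, hz⟩
      have := hjx z hz d (by simp)
      apply this
      rw [PySem.List.pyGet?_neg_one, hz] at hget
      exact hget
    rw [List.foldl_cons, hstep]
    have : s ++ d :: t = (s ++ [d]) ++ t := by simp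
    rw [this] at hc
    rw [ih (s ++ [d]) hc, this]

-- cancelling an adjacent opposite pair does not change A's result
theorem pvFoldl_cancel {s : List String} {a b : String} (y : List String)
    (ha : pvValid a)
    (hc : List.IsChain pvRA s) (hab : pvOpposites.get? a = some b) :
    (a :: b :: y).foldl pvStep s = y.foldl pvStep s := by
  have hb : pvValid b := pv_opp_valid ha hab
  have key : pvStep (pvStep s a) b = s := by
    by_cases h1 : s ≠ [] ∧ pvOpposites.get? a = PySem.List.pyGet? s (-1)
    · -- a cancels the top of s; the top equals b, which is then pushed back
      rcases h1 with ⟨hne, hget⟩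
      have hsa : pvStep s a = s.dropLast := by unfold pvStep; rw [if_pos ⟨hne, hget⟩]
      rw [PySem.List.pyGet?_neg_one, hab] at hget
      have hlast : s.getLast? = some b := hget.symm
      have hdecomp : s = s.dropLast ++ [b] := by
        conv_lhs => rw [← s.dropLast_append_getLast? b hlast]
      have hpush : pvStep s.dropLast b = s.dropLast ++ [b] := by
        unfold pvStep
        rw [if_neg]
        rintro ⟨hne', hget'⟩
        rcases List.exists_cons_of_ne_nil hne' with ⟨z, u, he⟩
        have hcd : List.IsChain pvRA (s.dropLast ++ [b]) := by rw [← hdecomp]; exact hc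
        rcases (List.isChain_append).1 hcd with ⟨_, _, hjx⟩
        have hlast2 : ((s.dropLast).getLast?).isSome := by
          rw [he]; simp [List.getLast?_isSome]
        rcases Option.isSome_iff_exists.1 hlast2 with ⟨w, hw⟩
        have := hjx w hw b (by simp)
        apply this
        rw [PySem.List.pyGet?_neg_one, hw] at hget'
        exact hget'
      rw [hsa, hpush, ← hdecomp]
    · -- a is pushed and b cancels it back off
      have hsa : pvStep s a = s ++ [a] := by unfold pvStep; rw [if_neg h1]
      rw [hsa]
      unfold pvStep
      rw [if_pos]
      · simp
      · constructor
        · simp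
        · rw [PySem.List.pyGet?_neg_one_append_singleton]
          rw [pv_opp_symm ha hb hab]
  show List.foldl pvStep (pvStep (pvStep s a) b) y = List.foldl pvStep s y
  rw [key]

theorem pvScan_none_chain : ∀ {l : List String}, pvScan l = none →
    List.IsChain pvRA l := by
  intro l
  induction l with
  | nil => intro _; exact List.isChain_nil
  | cons a t ih =>
    cases t with
    | nil => intro _; exact List.isChain_singleton a
    | cons b t =>
      intro h
      rw [pvScan] at h
      split at h
      · simp at h
      · rename_i hno
        cases hm : pvScan (b :: t) with
        | none => exact List.isChain_cons_cons.2 ⟨hno, ih hm⟩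
        | some m => rw [hm] at h; simp at h

theorem pvScan_some_decomp : ∀ {l l' : List String}, pvScan l = some l' →
    ∃ x a b y, l = x ++ a :: b :: y ∧ l' = x ++ y ∧ pvOpposites.get? b = some a := by
  intro l
  induction l with
  | nil => intro l' h; simp [pvScan] at h
  | cons a t ih =>
    cases t with
    | nil => intro l' h; simp [pvScan] at h
    | cons b t =>
      intro l' h
      rw [pvScan] at h
      split at h
      · rename_i hyes
        cases h
        exact ⟨[], a, b, t, by simp, by simp, hyes⟩
      · cases hm : pvScan (b :: t) with
        | none => rw [hm] at h; simp at h
        | some m =>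
          rw [hm] at h
          cases h
          rcases ih hm with ⟨x, c, d, y, he, hm', hcd⟩
          exact ⟨a :: x, c, d, y, by simp [he], by simp [hm'], hcd⟩

theorem pvAlt_none (l : List String) (h : pvScan l = none) : dirReduc_alt l = l := by
  rw [dirReduc_alt]
  split
  · rename_i l' h'; rw [h] at h'; cases h'
  · rfl

theorem pvAlt_some {l l' : List String} (h : pvScan l = some l') :
    dirReduc_alt l = dirReduc_alt l' := by
  rw [dirReduc_alt]
  split
  · rename_i m h'; rw [h] at h'; cases h'; rfl
  · rename_i h'; rw [h] at h'; cases h'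

theorem pv_valid_of_opp {a b : String} (h : pvOpposites.get? a = some b) : pvValid a := by
  have hm : pvOpposites = PySem.Dict.mk
      [("NORTH", "SOUTH"), ("SOUTH", "NORTH"), ("EAST", "WEST"), ("WEST", "EAST")] := by decide
  rw [hm] at h
  simp only [PySem.Dict.get?_mk_cons] at h
  split_ifs at h with h1 h2 h3 h4
  · exact Or.inl (eq_of_beq h1).symm
  · exact Or.inr (Or.inl (eq_of_beq h2).symm)
  · exact Or.inr (Or.inr (Or.inl (eq_of_beq h3).symm))
  · exact Or.inr (Or.inr (Or.inr (eq_of_beq h4).symm))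
  · exact absurd h (by simp [PySem.Dict.get?])

-- an invalid head sits at the bottom of A's stack and is never popped
theorem pvBarrier {h : String} (hh : ¬ pvValid h) :
    ∀ (t s : List String), (∀ x ∈ t, pvValid x) →
      List.foldl pvStep (h :: s) t = h :: List.foldl pvStep s t := by
  intro t
  induction t with
  | nil => intro s _; rfl
  | cons d t ih =>
    intro s hv
    have hd : pvValid d := hv d (by simp)
    have hstep : pvStep (h :: s) d = h :: pvStep s d := by
      cases s with
      | nil =>
        unfold pvStep
        rw [if_neg, if_neg]
        · simp
        · rintro ⟨hne, _⟩; exact hne rfl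
        · rintro ⟨_, hget⟩
          rw [PySem.List.pyGet?_neg_one] at hget
          simp at hget
          exact hh (pv_opp_valid hd hget)
      | cons y u =>
        unfold pvStep
        have hlast : PySem.List.pyGet? (h :: y :: u) (-1) = PySem.List.pyGet? (y :: u) (-1) := by
          rw [PySem.List.pyGet?_neg_one, PySem.List.pyGet?_neg_one, List.getLast?_cons_cons]
        rw [hlast]
        by_cases hc : pvOpposites.get? d = PySem.List.pyGet? (y :: u) (-1)
        · rw [if_pos ⟨by simp, hc⟩, if_pos ⟨by simp, hc⟩]
          simp
        · rw [if_neg, if_neg]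
          · simp
          · rintro ⟨_, hget⟩; exact hc hget
          · rintro ⟨_, hget⟩; exact hc hget
    rw [List.foldl_cons, List.foldl_cons, hstep]
    exact ih (pvStep s d) (fun x hx => hv x (List.mem_cons_of_mem _ hx))

-- an invalid head never pairs in B's scan either
theorem pvScan_blocked {h : String} (hh : ¬ pvValid h) (t : List String) :
    pvScan (h :: t) = (pvScan t).map (h :: ·) := by
  cases t with
  | nil => rfl
  | cons b t =>
    rw [pvScan]
    rw [if_neg]
    intro hc
    exact hh (pv_opp_valid (pv_valid_of_opp hc) hc)

theorem pvAlt_blocked {h : String} (hh : ¬ pvValid h) :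
    ∀ (n : Nat) (t : List String), t.length ≤ n →
      dirReduc_alt (h :: t) = h :: dirReduc_alt t := by
  intro n
  induction n with
  | zero =>
    intro t ht
    have : t = [] := List.eq_nil_of_length_eq_zero (Nat.le_zero.1 ht)
    subst this
    rw [pvAlt_none (h :: []) rfl, pvAlt_none [] rfl]
  | succ n ih =>
    intro t ht
    cases hs : pvScan t with
    | none =>
      rw [pvAlt_none t hs, pvAlt_none (h :: t) (by rw [pvScan_blocked hh, hs]; rfl)]
    | some t' =>
      have hlt := pvScan_length hs
      rw [pvAlt_some (by rw [pvScan_blocked hh, hs]; rfl : pvScan (h :: t) = some (h :: t')),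
        ih t' (by omega), ← pvAlt_some hs]

theorem pvMain : ∀ (n : Nat) (l : List String), l.length ≤ n → (∀ x ∈ l, pvValid x) →
    l.foldl pvStep [] = dirReduc_alt l := by
  intro n
  induction n with
  | zero =>
    intro l hl _
    have : l = [] := List.eq_nil_of_length_eq_zero (Nat.le_zero.1 hl)
    subst this
    rw [pvAlt_none [] rfl]
    rfl
  | succ n ih =>
    intro l hl hv
    cases h : pvScan l with
    | none =>
      rw [pvAlt_none l h]
      exact pvFoldl_irr l [] (by simpa using pvScan_none_chain h)
    | some l' =>
      have halt := pvAlt_some h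
      rcases pvScan_some_decomp h with ⟨x, a, b, y, hle, hl', hba⟩
      have hva : pvValid a := hv a (by simp [hle])
      have hvb : pvValid b := hv b (by simp [hle])
      have hab : pvOpposites.get? a = some b := pv_opp_symm hvb hva hba
      have hchain : List.IsChain pvRA (x.foldl pvStep []) := pvFoldl_chain (by simp) x
      have step1 : l.foldl pvStep [] = (x ++ y).foldl pvStep [] := by
        rw [hle, List.foldl_append, List.foldl_append]
        exact pvFoldl_cancel y hva hchain hab
      have hlen : (x ++ y).length ≤ n := by
        have hlt := pvScan_length h
        rw [hl'] at hlt
        omega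
      have hv' : ∀ z ∈ x ++ y, pvValid z := by
        intro z hz
        apply hv
        rw [hle]
        rcases List.mem_append.1 hz with h' | h'
        · exact List.mem_append_left _ h'
        · exact List.mem_append_right _ (by simp [h'])
      rw [step1, ih (x ++ y) hlen hv', ← hl']
      exact halt.symm

-- ===== VERDICT (by name: the statement is the Claim_ definition above) =====
theorem dirReduc_spec : Claim_equal_dirReduc := by
  intro plan _ hpre
  show dirReduc plan = dirReduc_alt plan
  cases plan with
  | nil => rw [pvAlt_none [] rfl]; rfl
  | cons h t =>
    have hvt : ∀ x ∈ t, pvValid x := fun x hx => hpre x hx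
    by_cases hvh : pvValid h
    · have hv : ∀ x ∈ h :: t, pvValid x := by
        intro x hx
        rcases List.mem_cons.1 hx with rfl | hx
        · exact hvh
        · exact hvt x hx
      rw [dirReduc_eq_foldl]
      exact pvMain (h :: t).length (h :: t) le_rfl hv
    · rw [dirReduc_eq_foldl, List.foldl_cons]
      have h0 : pvStep [] h = [h] := by unfold pvStep; simp
      rw [h0]
      show List.foldl pvStep (h :: []) t = dirReduc_alt (h :: t)
      rw [pvBarrier hvh t [] hvt, pvAlt_blocked hvh t.length t le_rfl,
        pvMain t.length t le_rfl hvt]
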